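-- pv_equiv track=rewrite | github.com/hiranya911/coding-challenges | AdventOfCode2019/d22.py | repeated_composition
-- ===== SOURCE A (Python) =====
-- def repeated_composition(a, b, m, total):
--     # f(x) = ax + b
--     # Apply f(x) on itself m times
--     if m == 0:
--         return 1, 0
--     elif m % 2 == 0:
--         # g(x) = f(f(x)) = aax + ab + b
--         # Apply g(x) on itsemf m / 2 times
--         return repeated_composition(a*a % total, (a*b + b) % total, m // 2, total)
--     else:
--         # g(x) = f(x) applied on itself m - 1 times
--         # Suppose g(x)= cx + d
--         # f(g(x)) = a(cx + d) + b = acx + ad + b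
--         c, d = repeated_composition(a, b, m - 1, total)
--         return a*c % total, (a*d + b) % total
-- ===== SOURCE B (Python) =====
-- def repeated_composition(a, b, m, total):
--     # Iterative binary exponentiation over affine maps f(x) = ax + b (mod total).
--     rc, rd = 1, 0
--     bp, bq = a, b
--     while m > 0:
--         if m % 2 == 1:
--             rc, rd = bp * rc % total, (bp * rd + bq) % total
--         bp, bq = bp * bp % total, (bp * bq + bq) % total
--         m //= 2
--     return rc, rd
-- ===== Notes on version B (the rewrite author's own statement) =====
-- stated objective: alternative
-- what changed: Replaces A's recursive squaring (which peels one application at a time on odd counts) by an iterative binary-exponentiation loop that squares the affine base map and folds it into an accumulator pair, using constant stack instead of recursion.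
import Mathlib
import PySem

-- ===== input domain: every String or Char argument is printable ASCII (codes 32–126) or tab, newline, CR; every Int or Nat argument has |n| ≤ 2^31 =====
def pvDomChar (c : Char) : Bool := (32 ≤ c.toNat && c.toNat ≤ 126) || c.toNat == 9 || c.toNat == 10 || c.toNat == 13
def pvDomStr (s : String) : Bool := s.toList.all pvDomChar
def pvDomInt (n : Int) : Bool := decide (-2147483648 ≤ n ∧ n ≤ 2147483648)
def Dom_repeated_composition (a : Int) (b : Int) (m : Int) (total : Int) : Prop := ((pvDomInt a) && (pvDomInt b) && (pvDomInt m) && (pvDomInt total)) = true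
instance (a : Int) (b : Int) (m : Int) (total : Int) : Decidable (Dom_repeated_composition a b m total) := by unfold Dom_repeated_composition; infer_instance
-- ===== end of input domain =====

-- B is an iterative binary-exponentiation loop over affine maps instead of A's recursion; same value everywhere A returns.

-- ===== PORT A =====
-- literal transliteration of A's recursion; fuel = m.toNat + 1 only makes the
-- recursion total (it strictly exceeds the recursion depth whenever m ≥ 0)
def pvRepA (fuel : Nat) (a : Int) (b : Int) (m : Int) (total : Int) : Int × Int :=
  match fuel with
  | 0 => (1, 0)
  | f + 1 =>
    if m = 0 then (1, 0)
    else if PySem.Int.mod m 2 = 0 then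
      pvRepA f (PySem.Int.mod (a * a) total) (PySem.Int.mod (a * b + b) total)
        (PySem.Int.floordiv m 2) total
    else
      let cd := pvRepA f a b (m - 1) total
      (PySem.Int.mod (a * cd.1) total, PySem.Int.mod (a * cd.2 + b) total)

def repeated_composition (a : Int) (b : Int) (m : Int) (total : Int) : Int × Int :=
  pvRepA (m.toNat + 1) a b m total

-- ===== PORT B =====
-- transliteration of Source B's while-loop; fuel = m.toNat + 1 exceeds the iteration count
def pvRepB (fuel : Nat) (rc : Int) (rd : Int) (bp : Int) (bq : Int) (m : Int) (total : Int) : Int × Int :=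
  match fuel with
  | 0 => (rc, rd)
  | f + 1 =>
    if 0 < m then
      let r' := if PySem.Int.mod m 2 = 1 then
          (PySem.Int.mod (bp * rc) total, PySem.Int.mod (bp * rd + bq) total)
        else (rc, rd)
      pvRepB f r'.1 r'.2 (PySem.Int.mod (bp * bp) total) (PySem.Int.mod (bp * bq + bq) total)
        (PySem.Int.floordiv m 2) total
    else (rc, rd)

def repeated_composition_alt (a : Int) (b : Int) (m : Int) (total : Int) : Int × Int :=
  pvRepB (m.toNat + 1) 1 0 a b m total

-- ===== PRECONDITION & SPEC =====
-- Pre_ excludes exactly the inputs where A raises: m < 0 (infinite recursion,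
-- RecursionError) and total = 0 with m > 0 (ZeroDivisionError on `% total`).
def Pre_repeated_composition (a : Int) (b : Int) (m : Int) (total : Int) : Prop :=
  0 ≤ m ∧ (m = 0 ∨ total ≠ 0)
instance (a : Int) (b : Int) (m : Int) (total : Int) : Decidable (Pre_repeated_composition a b m total) := by unfold Pre_repeated_composition; infer_instance

def pvWitness_repeated_composition : Int × Int × Int × Int := (2, 3, 5, 7)

def Spec_repeated_composition (a : Int) (b : Int) (m : Int) (total : Int) (out : Int × Int) : Prop := out = repeated_composition_alt a b m total
instance (a : Int) (b : Int) (m : Int) (total : Int) (out : Int × Int) : Decidable (Spec_repeated_composition a b m total out) := by unfold Spec_repeated_composition; infer_instance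

-- ===== CLAIM (what is proved, stated in full; the proofs are below) =====
def Claim_equal_repeated_composition : Prop := ∀ (a : Int) (b : Int) (m : Int) (total : Int), Dom_repeated_composition a b m total → Pre_repeated_composition a b m total → Spec_repeated_composition a b m total (repeated_composition a b m total)

-- ===== LEMMAS AND PROOFS =====

-- geometric sum 1 + p + … + p^(k-1); f^k(x) = p^k x + q * geom p k for f(x) = p x + q
def pvGeom (p : Int) : Nat → Int
  | 0 => 0
  | k + 1 => p ^ k + pvGeom p k

theorem pvGeom_double (p : Int) (k : Nat) :
    pvGeom p (2 * k) = (p + 1) * pvGeom (p ^ 2) k := by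
  induction k with
  | zero => simp [pvGeom]
  | succ k ih =>
    have h : 2 * (k + 1) = 2 * k + 1 + 1 := by omega
    rw [h]
    show p ^ (2 * k + 1) + (p ^ (2 * k) + pvGeom p (2 * k)) =
      (p + 1) * ((p ^ 2) ^ k + pvGeom (p ^ 2) k)
    rw [ih, pow_succ, pow_mul]
    ring

theorem pvGeom_succ' (p : Int) (k : Nat) : pvGeom p (k + 1) = p * pvGeom p k + 1 := by
  induction k with
  | zero => simp [pvGeom]
  | succ k ih =>
    show p ^ (k + 1) + pvGeom p (k + 1) = p * (p ^ k + pvGeom p k) + 1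
    rw [ih, pow_succ]
    ring

theorem pv_dvd_mod (t x : Int) : t ∣ x - PySem.Int.mod x t := by
  refine ⟨PySem.Int.floordiv x t, ?_⟩
  have h := PySem.Int.floordiv_mul_add_mod x t
  linarith [mul_comm (PySem.Int.floordiv x t) t]

theorem pv_mod_sub_dvd (t x y : Int) (h : t ∣ x - y) : t ∣ PySem.Int.mod x t - y := by
  have h2 := pv_dvd_mod t x
  have : PySem.Int.mod x t - y = (x - y) - (x - PySem.Int.mod x t) := by ring
  rw [this]
  exact dvd_sub h h2

theorem pv_mod_congr {t : Int} (ht : t ≠ 0) {x y : Int} (h : t ∣ x - y) :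
    PySem.Int.mod x t = PySem.Int.mod y t := by
  have hd : t ∣ PySem.Int.mod x t - PySem.Int.mod y t := by
    have h1 := pv_dvd_mod t x
    have h2 := pv_dvd_mod t y
    have e : PySem.Int.mod x t - PySem.Int.mod y t =
        (x - y) - (x - PySem.Int.mod x t) + (y - PySem.Int.mod y t) := by ring
    rw [e]
    exact dvd_add (dvd_sub h h1) h2
  have hz : PySem.Int.mod x t - PySem.Int.mod y t = 0 := by
    rcases lt_or_gt_of_ne ht with hneg | hpos
    · have b1 := PySem.Int.mod_neg_bounds x hneg
      have b2 := PySem.Int.mod_neg_bounds y hneg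
      have : |PySem.Int.mod x t - PySem.Int.mod y t| < -t := by
        rw [abs_lt]; omega
      exact Int.eq_zero_of_abs_lt_dvd ((neg_dvd).mpr hd) this
    · have b1 := PySem.Int.mod_nonneg x hpos
      have b2 := PySem.Int.mod_lt x hpos
      have b3 := PySem.Int.mod_nonneg y hpos
      have b4 := PySem.Int.mod_lt y hpos
      refine Int.eq_zero_of_abs_lt_dvd hd ?_
      rw [abs_lt]; omega
  omega

theorem pv_mul_congr {t a b A B : Int} (h1 : t ∣ a - A) (h2 : t ∣ b - B) :
    t ∣ a * b - A * B := by
  have e : a * b - A * B = (a - A) * b + A * (b - B) := by ring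
  rw [e]
  exact dvd_add (h1.mul_right b) (h2.mul_left A)

theorem pv_mod_two_cast (n : Nat) : PySem.Int.mod (n : Int) 2 = ((n % 2 : Nat) : Int) := by
  exact_mod_cast PySem.Int.mod_natCast n 2

theorem pv_fdiv_two_cast (n : Nat) : PySem.Int.floordiv (n : Int) 2 = ((n / 2 : Nat) : Int) := by
  exact_mod_cast PySem.Int.floordiv_natCast n 2

-- characterisation of A's recursion: for m = n > 0 it returns the canonical
-- residues of the affine power f^n = (A^n, B * geom A n), tolerant of
-- congruent-mod-t arguments.
theorem pvRepA_spec : ∀ n : Nat, 0 < n → ∀ fuel : Nat, n < fuel →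
    ∀ a b A B t : Int, t ≠ 0 → t ∣ a - A → t ∣ b - B →
    pvRepA fuel a b (n : Int) t =
      (PySem.Int.mod (A ^ n) t, PySem.Int.mod (B * pvGeom A n) t) := by
  intro n
  induction n using Nat.strong_induction_on with
  | _ n IH =>
    intro hn fuel hfuel a b A B t ht ha hb
    obtain ⟨f, rfl⟩ : ∃ f, fuel = f + 1 := ⟨fuel - 1, by omega⟩
    have hne : (n : Int) ≠ 0 := by exact_mod_cast Nat.pos_iff_ne_zero.mp hn
    by_cases hpar : n % 2 = 0
    · -- even case
      set k := n / 2 with hk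
      have hk1 : 0 < k := by omega
      have hkn : n = 2 * k := by omega
      have step : pvRepA (f + 1) a b (n : Int) t =
          pvRepA f (PySem.Int.mod (a * a) t) (PySem.Int.mod (a * b + b) t) ((k : Int)) t := by
        show (if (n : Int) = 0 then _ else if PySem.Int.mod (n : Int) 2 = 0 then _ else _) = _
        rw [if_neg hne, pv_mod_two_cast, pv_fdiv_two_cast]
        rw [if_pos (by exact_mod_cast congrArg (Nat.cast : Nat → Int) hpar)]
      rw [step]
      have ha' : t ∣ PySem.Int.mod (a * a) t - A ^ 2 := by
        apply pv_mod_sub_dvd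
        have := pv_mul_congr ha ha
        rw [show A ^ 2 = A * A by ring]; exact this
      have hb' : t ∣ PySem.Int.mod (a * b + b) t - (A * B + B) := by
        apply pv_mod_sub_dvd
        have e : a * b + b - (A * B + B) = (a * b - A * B) + (b - B) := by ring
        rw [e]; exact dvd_add (pv_mul_congr ha hb) hb
      rw [IH k (by omega) hk1 f (by omega) _ _ _ _ _ ht ha' hb']
      rw [hkn]
      congr 1
      · exact congrArg (fun z => PySem.Int.mod z t) (by rw [pow_mul])
      · exact congrArg (fun z => PySem.Int.mod z t) (by rw [pvGeom_double]; ring)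
    · -- odd case
      have hpar1 : n % 2 = 1 := by omega
      have hmod : PySem.Int.mod (n : Int) 2 ≠ 0 := by
        rw [pv_mod_two_cast, hpar1]; decide
      have hsub : (n : Int) - 1 = ((n - 1 : Nat) : Int) := by omega
      have step : pvRepA (f + 1) a b (n : Int) t =
          ((PySem.Int.mod (a * (pvRepA f a b ((n - 1 : Nat) : Int) t).1) t,
            PySem.Int.mod (a * (pvRepA f a b ((n - 1 : Nat) : Int) t).2 + b) t)) := by
        show (if (n : Int) = 0 then _ else if PySem.Int.mod (n : Int) 2 = 0 then _ else _) = _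
        rw [if_neg hne, if_neg hmod, hsub]
      rw [step]
      by_cases h1 : n = 1
      · subst h1
        obtain ⟨f', rfl⟩ : ∃ f', f = f' + 1 := ⟨f - 1, by omega⟩
        have base : pvRepA (f' + 1) a b ((1 - 1 : Nat) : Int) t = (1, 0) := by
          show (if ((0 : Nat) : Int) = 0 then _ else _) = _
          rw [if_pos (by norm_num)]
        rw [base]
        have g1 : pvGeom A 1 = 1 := by simp [pvGeom]
        refine Prod.ext ?_ ?_ <;> simp only
        · rw [pow_one]
          exact pv_mod_congr ht (by simpa using ha)
        · rw [g1]
          exact pv_mod_congr ht (by simpa using hb)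
      · have hn1 : 0 < n - 1 := by omega
        rw [IH (n - 1) (by omega) hn1 f (by omega) _ _ _ _ _ ht ha hb]
        have hc : t ∣ PySem.Int.mod (A ^ (n - 1)) t - A ^ (n - 1) :=
          pv_mod_sub_dvd t _ _ (by simp)
        have hd : t ∣ PySem.Int.mod (B * pvGeom A (n - 1)) t - B * pvGeom A (n - 1) :=
          pv_mod_sub_dvd t _ _ (by simp)
        have hnn : n - 1 + 1 = n := by omega
        refine Prod.ext ?_ ?_ <;> simp only
        · apply pv_mod_congr ht
          have := pv_mul_congr ha hc
          have e : A * A ^ (n - 1) = A ^ n := by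
            rw [← pow_succ']
            exact congrArg (A ^ ·) hnn
          rw [← e]; exact this
        · apply pv_mod_congr ht
          have hmain : t ∣ a * PySem.Int.mod (B * pvGeom A (n - 1)) t + b -
              (A * (B * pvGeom A (n - 1)) + B) := by
            have e : a * PySem.Int.mod (B * pvGeom A (n - 1)) t + b -
                (A * (B * pvGeom A (n - 1)) + B) =
                (a * PySem.Int.mod (B * pvGeom A (n - 1)) t - A * (B * pvGeom A (n - 1))) +
                (b - B) := by ring
            rw [e]; exact dvd_add (pv_mul_congr ha hd) hb
          have e2 : B * pvGeom A n = A * (B * pvGeom A (n - 1)) + B := by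
            have h := pvGeom_succ' A (n - 1)
            rw [hnn] at h
            rw [h]; ring
          rw [e2]; exact hmain

-- characterisation of B's loop: for m = n > 0, starting from accumulator (c,d)
-- and base (p,q), it returns the canonical residues of base^n ∘ (c,d).
theorem pvRepB_spec : ∀ n : Nat, 0 < n → ∀ fuel : Nat, n < fuel →
    ∀ c d p q C D P Q t : Int, t ≠ 0 →
    t ∣ c - C → t ∣ d - D → t ∣ p - P → t ∣ q - Q →
    pvRepB fuel c d p q (n : Int) t =
      (PySem.Int.mod (P ^ n * C) t, PySem.Int.mod (P ^ n * D + Q * pvGeom P n) t) := by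
  intro n
  induction n using Nat.strong_induction_on with
  | _ n IH =>
    intro hn fuel hfuel c d p q C D P Q t ht hc hd hp hq
    obtain ⟨f, rfl⟩ : ∃ f, fuel = f + 1 := ⟨fuel - 1, by omega⟩
    have hpos : (0 : Int) < (n : Int) := by exact_mod_cast hn
    have hp2 : t ∣ PySem.Int.mod (p * p) t - P ^ 2 := by
      apply pv_mod_sub_dvd
      rw [show P ^ 2 = P * P by ring]; exact pv_mul_congr hp hp
    have hq2 : t ∣ PySem.Int.mod (p * q + q) t - (P * Q + Q) := by
      apply pv_mod_sub_dvd
      have e : p * q + q - (P * Q + Q) = (p * q - P * Q) + (q - Q) := by ring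
      rw [e]; exact dvd_add (pv_mul_congr hp hq) hq
    by_cases hpar : n % 2 = 0
    · -- even: no fold
      set k := n / 2 with hk
      have hk1 : 0 < k := by omega
      have hkn : n = 2 * k := by omega
      have step : pvRepB (f + 1) c d p q (n : Int) t =
          pvRepB f c d (PySem.Int.mod (p * p) t) (PySem.Int.mod (p * q + q) t) ((k : Int)) t := by
        show (if 0 < (n : Int) then _ else _) = _
        rw [if_pos hpos, pv_mod_two_cast, pv_fdiv_two_cast, hpar]
        norm_num
        rw [show ((n : Int)) / 2 = (k : Int) by omega]
      rw [step]
      rw [IH k (by omega) hk1 f (by omega) _ _ _ _ C D (P ^ 2) (P * Q + Q) _ ht hc hd hp2 hq2]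
      rw [hkn]
      congr 1
      · exact congrArg (fun z => PySem.Int.mod z t) (by rw [pow_mul])
      · exact congrArg (fun z => PySem.Int.mod z t) (by rw [pow_mul, pvGeom_double]; ring)
    · -- odd: fold base into the accumulator first
      have hpar1 : n % 2 = 1 := by omega
      set k := n / 2 with hk
      have hkn : n = 2 * k + 1 := by omega
      have step : pvRepB (f + 1) c d p q (n : Int) t =
          pvRepB f (PySem.Int.mod (p * c) t) (PySem.Int.mod (p * d + q) t)
            (PySem.Int.mod (p * p) t) (PySem.Int.mod (p * q + q) t) ((k : Int)) t := by
        show (if 0 < (n : Int) then _ else _) = _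
        rw [if_pos hpos, pv_mod_two_cast, pv_fdiv_two_cast, hpar1]
        norm_num
        rw [show ((n : Int)) / 2 = (k : Int) by omega]
      rw [step]
      have hc' : t ∣ PySem.Int.mod (p * c) t - P * C := pv_mod_sub_dvd t _ _ (pv_mul_congr hp hc)
      have hd' : t ∣ PySem.Int.mod (p * d + q) t - (P * D + Q) := by
        apply pv_mod_sub_dvd
        have e : p * d + q - (P * D + Q) = (p * d - P * D) + (q - Q) := by ring
        rw [e]; exact dvd_add (pv_mul_congr hp hd) hq
      by_cases h1 : k = 0
      · -- n = 1: inner call sees m = 0 and returns the folded accumulator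
        have hn1 : n = 1 := by omega
        obtain ⟨f', rfl⟩ : ∃ f', f = f' + 1 := ⟨f - 1, by omega⟩
        have base : pvRepB (f' + 1) (PySem.Int.mod (p * c) t) (PySem.Int.mod (p * d + q) t)
            (PySem.Int.mod (p * p) t) (PySem.Int.mod (p * q + q) t) ((k : Int)) t =
            (PySem.Int.mod (p * c) t, PySem.Int.mod (p * d + q) t) := by
          show (if (0 : Int) < (k : Int) then _ else _) = _
          rw [if_neg (by simp [h1])]
        rw [base, hn1]
        have g1 : pvGeom P 1 = 1 := by simp [pvGeom]
        refine Prod.ext ?_ ?_ <;> simp only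
        · rw [pow_one]; exact pv_mod_congr ht (pv_mul_congr hp hc)
        · rw [pow_one, g1, mul_one]
          apply pv_mod_congr ht
          have e : p * d + q - (P * D + Q) = (p * d - P * D) + (q - Q) := by ring
          rw [e]; exact dvd_add (pv_mul_congr hp hd) hq
      · have hk1 : 0 < k := by omega
        rw [IH k (by omega) hk1 f (by omega) _ _ _ _ (P * C) (P * D + Q) (P ^ 2) (P * Q + Q) _
          ht hc' hd' hp2 hq2]
        have hpw : (P ^ 2) ^ k = P ^ (2 * k) := by rw [pow_mul]
        have hgk : pvGeom P (2 * k + 1) = P ^ (2 * k) + pvGeom P (2 * k) := rfl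
        rw [hkn]
        refine Prod.ext ?_ ?_ <;> simp only
        · apply congrArg (fun z => PySem.Int.mod z t)
          rw [hpw, pow_succ]; ring
        · apply congrArg (fun z => PySem.Int.mod z t)
          rw [hpw, hgk, pvGeom_double, pow_succ]; ring

-- ===== VERDICT (by name: the statement is the Claim_ definition above) =====
theorem repeated_composition_spec : Claim_equal_repeated_composition := by
  intro a b m total _ hpre
  obtain ⟨hm, hor⟩ := hpre
  unfold Spec_repeated_composition repeated_composition repeated_composition_alt
  by_cases hm0 : m = 0
  · subst hm0
    rfl
  · have ht : total ≠ 0 := by tauto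
    obtain ⟨n, rfl⟩ : ∃ n : Nat, m = (n : Int) := ⟨m.toNat, by omega⟩
    have hn : 0 < n := by
      rcases Nat.eq_zero_or_pos n with h | h
      · subst h; simp at hm0
      · exact h
    have hfuel : n < (n : Int).toNat + 1 := by omega
    have hz : ∀ x : Int, total ∣ x - x := fun x => by simp
    rw [pvRepA_spec n hn _ hfuel a b a b total ht (hz a) (hz b)]
    rw [pvRepB_spec n hn _ hfuel 1 0 a b 1 0 a b total ht (hz 1) (hz 0) (hz a) (hz b)]
    simp only [mul_one, mul_zero, zero_add]
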